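-- pv_equiv track=rewrite | github.com/lowandrew/sipping_portal | sipping_portal/sipper/tasks.py | remove_extraneous_log_metadata
-- ===== SOURCE A (Python) =====
-- def remove_extraneous_log_metadata(line_list):
--     cleaned_list = []
--
--     for item in line_list:
--         if item.startswith('MiSeqPath:'):
--             miseq_path = item.replace(',', '').replace('MiSeqPath: ', '')
--         elif item.startswith('MiSeqFolder'):
--             miseq_folder = item.replace(',', '').replace('MiSeqFolder: ', '')
--         elif item.startswith('Fastq destination'):
--             fastq_destination = item.replace(',', '').replace('Fastq destination: ', '')
--         elif item.startswith('SampleSheet'):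
--             samplesheet = item.replace(',', '').replace('SampleSheet: ', '')
--         else:
--             cleaned_list.append(item)
--         # Take last 5 items
--         cleaned_list = cleaned_list[-5:]
--     return cleaned_list
-- ===== SOURCE B (Python) =====
-- _METADATA_PREFIXES = ('MiSeqPath:', 'MiSeqFolder', 'Fastq destination', 'SampleSheet')
--
--
-- def remove_extraneous_log_metadata(line_list):
--     # Scan backwards, collecting at most 5 surviving lines, then restore order.
--     buf = []
--     for line in reversed(line_list):
--         if line.startswith(_METADATA_PREFIXES):
--             continue
--         buf.append(line)
--         if len(buf) == 5:
--             break
--     buf.reverse()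
--     return buf
-- ===== Notes on version B (the rewrite author's own statement) =====
-- stated objective: faster
-- what changed: Replaces A's forward pass that re-slices the accumulator to its last 5 elements on every iteration with a backward scan that collects at most 5 surviving lines and stops early, then reverses the buffer.
import Mathlib
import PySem

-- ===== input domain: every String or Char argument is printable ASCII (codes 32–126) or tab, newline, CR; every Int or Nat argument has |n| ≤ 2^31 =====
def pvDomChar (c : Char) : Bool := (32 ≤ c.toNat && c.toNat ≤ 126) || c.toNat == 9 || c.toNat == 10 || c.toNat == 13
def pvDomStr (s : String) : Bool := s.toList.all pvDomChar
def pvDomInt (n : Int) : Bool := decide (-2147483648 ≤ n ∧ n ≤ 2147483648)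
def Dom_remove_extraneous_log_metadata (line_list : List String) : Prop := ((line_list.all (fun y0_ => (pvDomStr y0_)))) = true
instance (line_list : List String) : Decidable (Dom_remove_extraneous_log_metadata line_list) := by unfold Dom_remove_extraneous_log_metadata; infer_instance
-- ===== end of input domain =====

-- B replaces A's forward pass with per-iteration truncation by a backward
-- early-stopping scan collecting at most 5 surviving lines (alternative decomposition).


-- ===== PORT A =====
def pvStepA (cleaned_list : List String) (item : String) : List String :=
  let cleaned_list :=
    if PySem.Str.startswith item "MiSeqPath:" then
      let _miseq_path := PySem.Str.replace (PySem.Str.replace item "," "") "MiSeqPath: " ""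
      cleaned_list
    else if PySem.Str.startswith item "MiSeqFolder" then
      let _miseq_folder := PySem.Str.replace (PySem.Str.replace item "," "") "MiSeqFolder: " ""
      cleaned_list
    else if PySem.Str.startswith item "Fastq destination" then
      let _fastq_destination := PySem.Str.replace (PySem.Str.replace item "," "") "Fastq destination: " ""
      cleaned_list
    else if PySem.Str.startswith item "SampleSheet" then
      let _samplesheet := PySem.Str.replace (PySem.Str.replace item "," "") "SampleSheet: " ""
      cleaned_list
    else
      cleaned_list ++ [item]
  -- cleaned_list = cleaned_list[-5:]
  PySem.List.slice cleaned_list (some (-5)) none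

def remove_extraneous_log_metadata (line_list : List String) : List String :=
  line_list.foldl pvStepA []

-- ===== PORT B =====
def pvKeep (line : String) : Bool :=
  !(PySem.Str.startswith line "MiSeqPath:" || PySem.Str.startswith line "MiSeqFolder" ||
    PySem.Str.startswith line "Fastq destination" || PySem.Str.startswith line "SampleSheet")

def pvAltGo : List String → List String → List String
  | [], buf => buf.reverse
  | line :: rest, buf =>
      if pvKeep line then
        let buf := buf ++ [line]
        if buf.length == 5 then buf.reverse else pvAltGo rest buf
      else pvAltGo rest buf

def remove_extraneous_log_metadata_alt (line_list : List String) : List String :=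
  pvAltGo line_list.reverse []

-- ===== PRECONDITION & SPEC =====
def Spec_remove_extraneous_log_metadata (line_list : List String) (out : List String) : Prop := out = remove_extraneous_log_metadata_alt line_list
instance (line_list : List String) (out : List String) : Decidable (Spec_remove_extraneous_log_metadata line_list out) := by unfold Spec_remove_extraneous_log_metadata; infer_instance

-- ===== CLAIM (what is proved, stated in full; the proofs are below) =====
def Claim_equal_remove_extraneous_log_metadata : Prop := ∀ (line_list : List String), Dom_remove_extraneous_log_metadata line_list → Spec_remove_extraneous_log_metadata line_list (remove_extraneous_log_metadata line_list)

-- ===== LEMMAS AND PROOFS =====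

-- the last (up to) 5 elements of a list, in order
def pvLast5 (xs : List String) : List String := (xs.reverse.take 5).reverse

theorem pvLast5_eq_drop (xs : List String) : pvLast5 xs = xs.drop (xs.length - 5) := by
  unfold pvLast5
  rw [List.take_reverse]
  simp

theorem pvStepA_eq (st : List String) (x : String) :
    pvStepA st x = pvLast5 (if pvKeep x then st ++ [x] else st) := by
  unfold pvStepA pvKeep
  rw [PySem.List.slice_from_neg_ofNat _ 5 (by omega)]
  rw [pvLast5_eq_drop]
  split_ifs with h1 h2 h3 h4 <;> simp_all

theorem pvLast5_last5_append (a b : List String) :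
    pvLast5 (pvLast5 a ++ b) = pvLast5 (a ++ b) := by
  unfold pvLast5
  simp [List.take_append, List.take_take]

theorem pvFoldA (l : List String) : ∀ st : List String, st.length ≤ 5 →
    List.foldl pvStepA st l = pvLast5 (st ++ l.filter pvKeep) := by
  induction l with
  | nil =>
      intro st h
      rw [pvLast5_eq_drop]
      simp [Nat.sub_eq_zero_of_le h]
  | cons x xs ih =>
      intro st h
      rw [List.foldl_cons, pvStepA_eq, ih _ (by unfold pvLast5; simp), pvLast5_last5_append]
      by_cases hk : pvKeep x <;> simp [hk]

theorem pvAltGo_eq (l : List String) : ∀ buf : List String, buf.length < 5 →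
    pvAltGo l buf = (buf ++ (l.filter pvKeep).take (5 - buf.length)).reverse := by
  induction l with
  | nil => intro buf h; simp [pvAltGo]
  | cons x xs ih =>
      intro buf h
      by_cases hk : pvKeep x
      · simp only [pvAltGo, hk, if_true]
        by_cases h5 : (buf ++ [x]).length = 5
        · simp only [h5]
          have hb : buf.length = 4 := by simp at h5; omega
          simp [hk, hb]
        · have h5' : (buf ++ [x]).length < 5 := by simp at h5 ⊢; omega
          simp only [List.length_append, List.length_cons, List.length_nil]
          rw [if_neg (by simpa using h5)]
          rw [ih _ h5']
          have : 5 - buf.length = (5 - (buf ++ [x]).length) + 1 := by simp; omega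
          simp [hk, this, List.take_succ_cons]
      · simp only [pvAltGo, hk]
        rw [ih _ h]
        simp [hk]

-- ===== VERDICT (by name: the statement is the Claim_ definition above) =====
theorem remove_extraneous_log_metadata_spec : Claim_equal_remove_extraneous_log_metadata := by
  intro l _
  show remove_extraneous_log_metadata l = remove_extraneous_log_metadata_alt l
  unfold remove_extraneous_log_metadata remove_extraneous_log_metadata_alt
  rw [pvFoldA l [] (by simp), pvAltGo_eq l.reverse [] (by simp)]
  simp [pvLast5, List.filter_reverse]
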